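-- pv_equiv track=rewrite | github.com/AjinkyaTaranekar/LeetCode | 1736.latest-time-by-replacing-hidden-digits.py | maximumTime
-- ===== SOURCE A (Python) =====
-- def maximumTime(time: str) -> str:
--     max_time = "23:59" if time[0] in "?2" and time[1] in "?0123" else "19:59"
--     res = ''
--     for i,v in enumerate(time):
--         if v == '?':
--             res += max_time[i]
--         else:
--             res += v
--     return res
-- ===== SOURCE B (Python) =====
-- def maximumTime(time: str) -> str:
--     # Search-based: find the largest hour (0-23) and minute (0-59) whose two-digit
--     # forms are consistent with the pattern, then substitute their digits for '?'.
--     n = len(time)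
--
--     def ok(s, i):
--         # digit pair s is consistent with the pattern at positions i, i+1
--         return all(i + k >= n or time[i + k] in ('?', c) for k, c in enumerate(s))
--
--     hour = max((h for h in range(24) if ok("%02d" % h, 0)), default=0)
--     minute = max((m for m in range(60) if ok("%02d" % m, 3)), default=0)
--     repl = "%02d:%02d" % (hour, minute)
--     return ''.join(repl[i] if v == '?' else v for i, v in enumerate(time))
-- ===== Notes on version B (the rewrite author's own statement) =====
-- stated objective: alternative
-- what changed: B drops A's hand-cased template string ('23:59'/'19:59') and instead brute-force searches for the largest hour in 0..23 and the largest minute in 0..59 whose two-digit forms are consistent with the pattern, then substitutes their digits for the '?' marks.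
-- outside the precondition, e.g. on maximumTime('?x'): A returns '1x', B returns '0x'; on maximumTime('x?'): A returns 'x9', B returns 'x0'; on maximumTime('12:?x'): A returns '12:5x', B returns '12:0x'
import Mathlib
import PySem

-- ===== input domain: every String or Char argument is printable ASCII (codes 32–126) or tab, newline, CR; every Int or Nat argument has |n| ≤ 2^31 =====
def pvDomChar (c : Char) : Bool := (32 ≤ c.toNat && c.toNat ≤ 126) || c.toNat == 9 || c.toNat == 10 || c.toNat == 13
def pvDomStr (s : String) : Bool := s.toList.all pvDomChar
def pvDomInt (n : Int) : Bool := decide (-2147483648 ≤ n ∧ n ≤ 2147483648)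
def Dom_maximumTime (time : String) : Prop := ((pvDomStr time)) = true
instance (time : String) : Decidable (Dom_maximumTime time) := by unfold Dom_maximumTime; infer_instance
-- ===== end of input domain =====

-- B replaces A's hard-coded template condition by an exhaustive search: it computes the
-- largest hour in 0..23 and the largest minute in 0..59 consistent with the pattern and
-- substitutes their digits for the '?' marks (objective: alternative algorithm).

-- ===== PORT A =====
def maximumTime (time : String) : String :=
  let cs := time.toList
  let mt := (if ((PySem.List.pyGetD cs 0 ' ' = '?' ∨ PySem.List.pyGetD cs 0 ' ' = '2') ∧
                (PySem.List.pyGetD cs 1 ' ' = '?' ∨ PySem.List.pyGetD cs 1 ' ' = '0' ∨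
                 PySem.List.pyGetD cs 1 ' ' = '1' ∨ PySem.List.pyGetD cs 1 ' ' = '2' ∨
                 PySem.List.pyGetD cs 1 ' ' = '3'))
             then (['2','3',':','5','9'] : List Char) else ['1','9',':','5','9'])
  String.ofList ((PySem.List.enumerate cs).foldl
    (fun r iv => r ++ [if iv.2 = '?' then PySem.List.pyGetD mt iv.1 ' ' else iv.2]) [])

-- ===== PORT B =====
-- "%02d" % x, exact for 0 ≤ x < 100 (the only values B formats)
def pvPad2 (x : Int) : List Char :=
  [Char.ofNat (48 + (PySem.Int.floordiv x 10).toNat), Char.ofNat (48 + (PySem.Int.mod x 10).toNat)]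

-- ok(s, i) = all(i + k >= n or time[i + k] in ('?', c) for k, c in enumerate(s));
-- the index i + k is nonnegative and below n whenever it is read, so pyGet?'s default never fires
def pvOk (t : List Char) (s : List Char) (i : Int) : Bool :=
  (PySem.List.enumerate s).all (fun kc =>
    decide ((t.length : Int) ≤ i + kc.1) ||
    ((PySem.List.pyGet? t (i + kc.1)).getD ' ' == '?' ||
     (PySem.List.pyGet? t (i + kc.1)).getD ' ' == kc.2))

-- hour = max((h for h in range(24) if ok("%02d" % h, 0)), default=0)
def pvBestHour (t : List Char) : Int :=
  PySem.List.maxD ((PySem.List.pyRange 0 24 1).filter (fun h => pvOk t (pvPad2 h) 0)) (fun x => x) 0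

-- minute = max((m for m in range(60) if ok("%02d" % m, 3)), default=0)
def pvBestMin (t : List Char) : Int :=
  PySem.List.maxD ((PySem.List.pyRange 0 60 1).filter (fun m => pvOk t (pvPad2 m) 3)) (fun x => x) 0

def maximumTime_alt (time : String) : String :=
  let t := time.toList
  let repl := pvPad2 (pvBestHour t) ++ [':'] ++ pvPad2 (pvBestMin t)
  -- ''.join(repl[i] if v == '?' else v for i, v in enumerate(time));
  -- Python raises IndexError on repl[i] for a '?' at i ≥ 5 — Pre_ excludes exactly those inputs
  String.ofList ((PySem.List.enumerate t).map (fun iv =>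
    if iv.2 = '?' then (PySem.List.pyGet? repl iv.1).getD '?' else iv.2))

-- ===== PRECONDITION & SPEC =====
-- Pre_ excludes (a) the inputs on which A raises IndexError (empty string; one-char '?' or '2';
-- a '?' at index ≥ 5), and (b) malformed patterns where a '?' sits next to a character that no
-- valid time can match (e.g. "?x"): there A substitutes its template digit while B's search has
-- no candidate — both values are arbitrary on such non-time input, so neither is specified.
def Pre_maximumTime (time : String) : Prop :=
  time.toList ≠ [] ∧
  (time.toList.length = 1 → (time.toList.getD 0 ' ' ≠ '?' ∧ time.toList.getD 0 ' ' ≠ '2')) ∧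
  ('?' ∉ time.toList.drop 5) ∧
  (time.toList.getD 0 ' ' = '?' → 2 ≤ time.toList.length →
      time.toList.getD 1 ' ' ∈ (['?','0','1','2','3','4','5','6','7','8','9'] : List Char)) ∧
  (time.toList.getD 1 ' ' = '?' → 2 ≤ time.toList.length →
      time.toList.getD 0 ' ' ∈ (['?','0','1','2'] : List Char)) ∧
  (time.toList.getD 3 ' ' = '?' → 5 ≤ time.toList.length →
      time.toList.getD 4 ' ' ∈ (['?','0','1','2','3','4','5','6','7','8','9'] : List Char)) ∧
  (time.toList.getD 4 ' ' = '?' → 5 ≤ time.toList.length →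
      time.toList.getD 3 ' ' ∈ (['?','0','1','2','3','4','5'] : List Char))
instance (time : String) : Decidable (Pre_maximumTime time) := by unfold Pre_maximumTime; infer_instance
def pvWitness_maximumTime : String := "?4:5?"

def Spec_maximumTime (time : String) (out : String) : Prop := out = maximumTime_alt time
instance (time : String) (out : String) : Decidable (Spec_maximumTime time out) := by unfold Spec_maximumTime; infer_instance

-- ===== CLAIM (what is proved, stated in full; the proofs are below) =====
def Claim_equal_maximumTime : Prop := ∀ (time : String), Dom_maximumTime time → Pre_maximumTime time → Spec_maximumTime time (maximumTime time)

-- ===== LEMMAS AND PROOFS =====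

-- common normal form both ports are reduced to
def pvFix234 (l : List Char) : List Char :=
  match l with
  | [] => []
  | c :: l2 => (if c = '?' then ':' else c) ::
    match l2 with
    | [] => []
    | d :: l3 => (if d = '?' then '5' else d) ::
      match l3 with
      | [] => []
      | e :: t => (if e = '?' then '9' else e) :: t

def pvRhs (cs : List Char) : List Char :=
  match cs with
  | [] => []
  | [a] => [if a = '?' then '1' else a]
  | a :: b :: rest =>
      (if a = '?' then (if b = '?' ∨ b = '0' ∨ b = '1' ∨ b = '2' ∨ b = '3' then '2' else '1') else a) ::
      (if b = '?' then (if a = '2' ∨ a = '?' then '3' else '9') else b) ::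
      pvFix234 rest

theorem foldl_tail_no_q (mt : List Char) :
    ∀ (l : List Char) (s : Int) (acc : List Char), (∀ c ∈ l, c ≠ '?') →
    (PySem.List.enumerate l s).foldl
      (fun r iv => r ++ [if iv.2 = '?' then PySem.List.pyGetD mt iv.1 ' ' else iv.2]) acc
      = acc ++ l := by
  intro l
  induction l with
  | nil => intro s acc _; simp [PySem.List.enumerate_nil]
  | cons x xs ih =>
      intro s acc h
      have hx : x ≠ '?' := h x (by simp)
      simp only [PySem.List.enumerate_cons, List.foldl_cons, if_neg hx]
      rw [ih (s+1) _ (fun c hc => h c (by simp [hc]))]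
      simp

theorem pv_g1 (x y : Char) (l : List Char) (d : Char) : PySem.List.pyGetD (x::y::l) 1 d = y := by
  simp [PySem.List.pyGetD, PySem.List.pyIdx?, PySem.List.pyGet?]

theorem pv_mtA2 : PySem.List.pyGetD (['2','3',':','5','9'] : List Char) 2 ' ' = ':' := by decide
theorem pv_mtA3 : PySem.List.pyGetD (['2','3',':','5','9'] : List Char) 3 ' ' = '5' := by decide
theorem pv_mtA4 : PySem.List.pyGetD (['2','3',':','5','9'] : List Char) 4 ' ' = '9' := by decide
theorem pv_mtB2 : PySem.List.pyGetD (['1','9',':','5','9'] : List Char) 2 ' ' = ':' := by decide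
theorem pv_mtB3 : PySem.List.pyGetD (['1','9',':','5','9'] : List Char) 3 ' ' = '5' := by decide
theorem pv_mtB4 : PySem.List.pyGetD (['1','9',':','5','9'] : List Char) 4 ' ' = '9' := by decide

set_option maxHeartbeats 1000000 in
theorem a_to_rhs (cs : List Char) (h5 : ∀ x ∈ cs.drop 5, x ≠ '?') :
    maximumTime (String.ofList cs) = String.ofList (pvRhs cs) := by
  match cs with
  | [] => decide
  | [a] =>
      simp only [maximumTime, pvRhs, String.toList_ofList,
        PySem.List.enumerate_cons, PySem.List.enumerate_nil, List.foldl_cons, List.foldl_nil]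
      by_cases ha : a = '?' <;>
        simp [ha, PySem.List.pyGetD, PySem.List.pyIdx?, PySem.List.pyGet?]
  | [a, b] =>
      simp only [maximumTime, pvRhs, pvFix234, String.toList_ofList,
        PySem.List.enumerate_cons, PySem.List.enumerate_nil, List.foldl_cons, List.foldl_nil]
      by_cases ha : a = '?' <;> by_cases ha2 : a = '2' <;> by_cases hb : b = '?' <;>
        by_cases hbs : (b = '0' ∨ b = '1' ∨ b = '2' ∨ b = '3') <;>
        simp [ha, ha2, hb, hbs, PySem.List.pyGetD_zero_cons, pv_g1]
  | [a, b, c] =>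
      simp only [maximumTime, pvRhs, pvFix234, String.toList_ofList,
        PySem.List.enumerate_cons, PySem.List.enumerate_nil, List.foldl_cons, List.foldl_nil]
      by_cases ha : a = '?' <;> by_cases ha2 : a = '2' <;> by_cases hb : b = '?' <;>
        by_cases hbs : (b = '0' ∨ b = '1' ∨ b = '2' ∨ b = '3') <;> by_cases hc : c = '?' <;>
        simp [ha, ha2, hb, hbs, hc, PySem.List.pyGetD_zero_cons, pv_g1,
          pv_mtA2, pv_mtB2]
  | [a, b, c, d] =>
      simp only [maximumTime, pvRhs, pvFix234, String.toList_ofList,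
        PySem.List.enumerate_cons, PySem.List.enumerate_nil, List.foldl_cons, List.foldl_nil]
      by_cases ha : a = '?' <;> by_cases ha2 : a = '2' <;> by_cases hb : b = '?' <;>
        by_cases hbs : (b = '0' ∨ b = '1' ∨ b = '2' ∨ b = '3') <;> by_cases hc : c = '?' <;>
        by_cases hd : d = '?' <;>
        simp [ha, ha2, hb, hbs, hc, hd, PySem.List.pyGetD_zero_cons, pv_g1,
          pv_mtA2, pv_mtA3, pv_mtB2, pv_mtB3]
  | a :: b :: c :: d :: e :: t =>
      have ht : ∀ x ∈ t, x ≠ '?' := by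
        intro x hx; exact h5 x (by simpa using hx)
      simp only [maximumTime, pvRhs, pvFix234, String.toList_ofList,
        PySem.List.enumerate_cons, List.foldl_cons]
      rw [foldl_tail_no_q _ t (0+1+1+1+1+1) _ ht]
      clear h5 ht
      by_cases ha : a = '?' <;> by_cases ha2 : a = '2' <;> by_cases hb : b = '?' <;>
        by_cases hbs : (b = '0' ∨ b = '1' ∨ b = '2' ∨ b = '3') <;> by_cases hc : c = '?' <;>
        by_cases hd : d = '?' <;> by_cases he : e = '?' <;>
        simp [ha, ha2, hb, hbs, hc, hd, he, PySem.List.pyGetD_zero_cons, pv_g1,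
          pv_mtA2, pv_mtA3, pv_mtA4, pv_mtB2, pv_mtB3, pv_mtB4]

-- ---- B-side characterization ----

def pvFit2 (a b x y : Char) : Bool := (a == '?' || a == x) && (b == '?' || b == y)

theorem pvOk_cons2 (a b : Char) (r : List Char) (x y : Char) :
    pvOk (a :: b :: r) [x, y] 0 = pvFit2 a b x y := by
  simp [pvOk, pvFit2, PySem.List.enumerate_cons, PySem.List.enumerate_nil,
    PySem.List.pyGet?, PySem.List.pyIdx?,
    show ¬((r.length:Int)+1 < 0) by omega, show (0:Int) ≤ (r.length:Int)+1 by omega,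
    show ¬((r.length:Int) < 0) by omega]

theorem pvOk3_cons5 (a b c d e : Char) (r : List Char) (x y : Char) :
    pvOk (a :: b :: c :: d :: e :: r) [x, y] 3 = pvFit2 d e x y := by
  simp [pvOk, pvFit2, PySem.List.enumerate_cons, PySem.List.enumerate_nil,
    PySem.List.pyGet?, PySem.List.pyIdx?,
    show ¬((r.length:Int)+1+1+1+1 < 3) by omega, show (3:Int) ≤ (r.length:Int)+1+1+1+1 by omega,
    show ¬((r.length:Int)+1+1+1+1 < 4) by omega, show (4:Int) ≤ (r.length:Int)+1+1+1+1 by omega]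

theorem pvOk3_len4 (a b c d : Char) (x y : Char) :
    pvOk [a, b, c, d] [x, y] 3 = (d == '?' || d == x) := by
  simp [pvOk, PySem.List.enumerate_cons, PySem.List.enumerate_nil,
    PySem.List.pyGet?, PySem.List.pyIdx?]

def pvHourOf (a b : Char) : Int :=
  PySem.List.maxD ((PySem.List.pyRange 0 24 1).filter
    (fun h => pvFit2 a b (Char.ofNat (48 + (PySem.Int.floordiv h 10).toNat))
                         (Char.ofNat (48 + (PySem.Int.mod h 10).toNat)))) (fun x => x) 0

def pvMinOf (d e : Char) : Int :=
  PySem.List.maxD ((PySem.List.pyRange 0 60 1).filter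
    (fun m => pvFit2 d e (Char.ofNat (48 + (PySem.Int.floordiv m 10).toNat))
                         (Char.ofNat (48 + (PySem.Int.mod m 10).toNat)))) (fun x => x) 0

theorem bestHour_cons (a b : Char) (r : List Char) :
    pvBestHour (a :: b :: r) = pvHourOf a b := by
  unfold pvBestHour pvHourOf
  congr 1
  refine List.filter_congr (fun h _ => ?_)
  rw [show pvPad2 h = [Char.ofNat (48 + (PySem.Int.floordiv h 10).toNat),
        Char.ofNat (48 + (PySem.Int.mod h 10).toNat)] from rfl, pvOk_cons2]

theorem bestMin_cons5 (a b c d e : Char) (r : List Char) :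
    pvBestMin (a :: b :: c :: d :: e :: r) = pvMinOf d e := by
  unfold pvBestMin pvMinOf
  congr 1
  refine List.filter_congr (fun m _ => ?_)
  rw [show pvPad2 m = [Char.ofNat (48 + (PySem.Int.floordiv m 10).toNat),
        Char.ofNat (48 + (PySem.Int.mod m 10).toNat)] from rfl, pvOk3_cons5]

theorem bestMin_len4_q (a b c : Char) : pvBestMin [a, b, c, '?'] = 59 := by
  unfold pvBestMin
  have hq : ∀ m ∈ PySem.List.pyRange 0 60 1, (pvOk [a, b, c, '?'] (pvPad2 m) 3) = true := by
    intro m _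
    rw [show pvPad2 m = [Char.ofNat (48 + (PySem.Int.floordiv m 10).toNat),
        Char.ofNat (48 + (PySem.Int.mod m 10).toNat)] from rfl, pvOk3_len4]
    simp
  rw [List.filter_congr hq]
  decide

-- the four finite searches, evaluated (the right-hand sides are exactly pvRhs's branch values)
theorem pvL0 : ∀ b ∈ (['?','0','1','2','3','4','5','6','7','8','9'] : List Char),
    Char.ofNat (48 + (pvHourOf '?' b / 10).toNat)
      = (if b = '?' ∨ b = '0' ∨ b = '1' ∨ b = '2' ∨ b = '3' then '2' else '1') := by
  intro b hb; fin_cases hb <;> decide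

theorem pvL1 : ∀ a ∈ (['?','0','1','2'] : List Char),
    Char.ofNat (48 + (pvHourOf a '?' % 10).toNat)
      = (if a = '2' ∨ a = '?' then '3' else '9') := by
  intro a ha; fin_cases ha <;> decide

theorem pvM0 : ∀ e ∈ (['?','0','1','2','3','4','5','6','7','8','9'] : List Char),
    Char.ofNat (48 + (pvMinOf '?' e / 10).toNat) = '5' := by
  intro e he; fin_cases he <;> decide

theorem pvM1 : ∀ d ∈ (['?','0','1','2','3','4','5'] : List Char),
    Char.ofNat (48 + (pvMinOf d '?' % 10).toNat) = '9' := by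
  intro d hd; fin_cases hd <;> decide

theorem map_tail_no_q (repl : List Char) :
    ∀ (l : List Char) (s : Int), (∀ c ∈ l, c ≠ '?') →
    (PySem.List.enumerate l s).map
      (fun iv => if iv.2 = '?' then (PySem.List.pyGet? repl iv.1).getD '?' else iv.2) = l := by
  intro l
  induction l with
  | nil => intro s _; simp [PySem.List.enumerate_nil]
  | cons x xs ih =>
      intro s h
      have hx : x ≠ '?' := h x (by simp)
      simp only [PySem.List.enumerate_cons, List.map_cons, if_neg hx]
      rw [ih (s+1) (fun c hc => h c (by simp [hc]))]

set_option maxHeartbeats 2000000 in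
theorem b_to_rhs (cs : List Char)
    (h1 : cs.length = 1 → (cs.getD 0 ' ' ≠ '?' ∧ cs.getD 0 ' ' ≠ '2'))
    (h5 : '?' ∉ cs.drop 5)
    (hp0 : cs.getD 0 ' ' = '?' → 2 ≤ cs.length → cs.getD 1 ' ' ∈ (['?','0','1','2','3','4','5','6','7','8','9'] : List Char))
    (hp1 : cs.getD 1 ' ' = '?' → 2 ≤ cs.length → cs.getD 0 ' ' ∈ (['?','0','1','2'] : List Char))
    (hp3 : cs.getD 3 ' ' = '?' → 5 ≤ cs.length → cs.getD 4 ' ' ∈ (['?','0','1','2','3','4','5','6','7','8','9'] : List Char))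
    (hp4 : cs.getD 4 ' ' = '?' → 5 ≤ cs.length → cs.getD 3 ' ' ∈ (['?','0','1','2','3','4','5'] : List Char)) :
    maximumTime_alt (String.ofList cs) = String.ofList (pvRhs cs) := by
  match cs with
  | [] => decide
  | [a] =>
      have ha : a ≠ '?' := by
        have := h1 (by simp)
        simpa using this.1
      simp only [maximumTime_alt, pvRhs, String.toList_ofList,
        PySem.List.enumerate_cons, PySem.List.enumerate_nil, List.map_cons, List.map_nil]
      simp [ha]
  | [a, b] =>
      have hp0' : a = '?' → b ∈ (['?','0','1','2','3','4','5','6','7','8','9'] : List Char) := fun h => hp0 (by simpa using h) (by simp)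
      have hp1' : b = '?' → a ∈ (['?','0','1','2'] : List Char) := fun h => hp1 (by simpa using h) (by simp)
      simp only [maximumTime_alt, pvRhs, String.toList_ofList, bestHour_cons,
        PySem.List.enumerate_cons, PySem.List.enumerate_nil, List.map_cons, List.map_nil]
      by_cases ha : a = '?'
      · by_cases hb : b = '?'
        · simp [pvFix234, ha, hb, pvPad2, PySem.List.pyGet?, PySem.List.pyIdx?, pvL0 '?' (by decide), pvL1 '?' (by decide)]
        · simp [pvFix234, ha, hb, pvPad2, PySem.List.pyGet?, PySem.List.pyIdx?, pvL0 b (hp0' ha)]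
      · by_cases hb : b = '?'
        · simp [pvFix234, ha, hb, pvPad2, PySem.List.pyGet?, PySem.List.pyIdx?, pvL1 a (hp1' hb)]
        · simp [pvFix234, ha, hb]
  | [a, b, c] =>
      have hp0' : a = '?' → b ∈ (['?','0','1','2','3','4','5','6','7','8','9'] : List Char) := fun h => hp0 (by simpa using h) (by simp)
      have hp1' : b = '?' → a ∈ (['?','0','1','2'] : List Char) := fun h => hp1 (by simpa using h) (by simp)
      simp only [maximumTime_alt, pvRhs, pvFix234, String.toList_ofList, bestHour_cons,
        PySem.List.enumerate_cons, PySem.List.enumerate_nil, List.map_cons, List.map_nil]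
      by_cases ha : a = '?'
      · by_cases hb : b = '?'
        · by_cases hc : c = '?' <;>
            simp [pvFix234, ha, hb, hc, pvPad2, PySem.List.pyGet?, PySem.List.pyIdx?, pvL0 '?' (by decide), pvL1 '?' (by decide)]
        · by_cases hc : c = '?' <;> simp [pvFix234, ha, hb, hc, pvPad2, PySem.List.pyGet?, PySem.List.pyIdx?, pvL0 b (hp0' ha)]
      · by_cases hb : b = '?'
        · by_cases hc : c = '?' <;> simp [pvFix234, ha, hb, hc, pvPad2, PySem.List.pyGet?, PySem.List.pyIdx?, pvL1 a (hp1' hb)]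
        · by_cases hc : c = '?' <;> simp [pvFix234, ha, hb, hc, pvPad2, PySem.List.pyGet?, PySem.List.pyIdx?]
  | [a, b, c, d] =>
      have hp0' : a = '?' → b ∈ (['?','0','1','2','3','4','5','6','7','8','9'] : List Char) := fun h => hp0 (by simpa using h) (by simp)
      have hp1' : b = '?' → a ∈ (['?','0','1','2'] : List Char) := fun h => hp1 (by simpa using h) (by simp)
      simp only [maximumTime_alt, pvRhs, pvFix234, String.toList_ofList, bestHour_cons,
        PySem.List.enumerate_cons, PySem.List.enumerate_nil, List.map_cons, List.map_nil]
      by_cases ha : a = '?'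
      · by_cases hb : b = '?'
        · by_cases hc : c = '?' <;> by_cases hd : d = '?' <;>
            simp [pvFix234, ha, hb, hc, hd, bestMin_len4_q, pvPad2, PySem.List.pyGet?, PySem.List.pyIdx?, pvL0 '?' (by decide), pvL1 '?' (by decide)]
        · by_cases hc : c = '?' <;> by_cases hd : d = '?' <;>
            simp [pvFix234, ha, hb, hc, hd, bestMin_len4_q, pvPad2, PySem.List.pyGet?, PySem.List.pyIdx?, pvL0 b (hp0' ha)]
      · by_cases hb : b = '?'
        · by_cases hc : c = '?' <;> by_cases hd : d = '?' <;>
            simp [pvFix234, ha, hb, hc, hd, bestMin_len4_q, pvPad2, PySem.List.pyGet?, PySem.List.pyIdx?, pvL1 a (hp1' hb)]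
        · by_cases hc : c = '?' <;> by_cases hd : d = '?' <;>
            simp [pvFix234, ha, hb, hc, hd, bestMin_len4_q, pvPad2, PySem.List.pyGet?, PySem.List.pyIdx?]
  | a :: b :: c :: d :: e :: r =>
      have hp0' : a = '?' → b ∈ (['?','0','1','2','3','4','5','6','7','8','9'] : List Char) := fun h => hp0 (by simpa using h) (by simp)
      have hp1' : b = '?' → a ∈ (['?','0','1','2'] : List Char) := fun h => hp1 (by simpa using h) (by simp)
      have hp3' : d = '?' → e ∈ (['?','0','1','2','3','4','5','6','7','8','9'] : List Char) := fun h => hp3 (by simpa using h) (by simp)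
      have hp4' : e = '?' → d ∈ (['?','0','1','2','3','4','5'] : List Char) := fun h => hp4 (by simpa using h) (by simp)
      have hr : ∀ x ∈ r, x ≠ '?' := by
        intro x hx hq
        exact h5 (by simpa using (hq ▸ hx))
      simp only [maximumTime_alt, pvRhs, pvFix234, String.toList_ofList, bestHour_cons,
        bestMin_cons5, PySem.List.enumerate_cons, List.map_cons]
      rw [map_tail_no_q _ r (0+1+1+1+1+1) hr]
      by_cases ha : a = '?'
      · by_cases hb : b = '?'
        · by_cases hd : d = '?'
          · by_cases he : e = '?'
            · by_cases hc : c = '?' <;> simp [pvFix234, hc, ha, hb, hd, he, pvPad2, PySem.List.pyGet?, PySem.List.pyIdx?, pvL0 '?' (by decide), pvL1 '?' (by decide), pvM0 '?' (by decide), pvM1 '?' (by decide)]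
            · by_cases hc : c = '?' <;> simp [pvFix234, hc, ha, hb, hd, he, pvPad2, PySem.List.pyGet?, PySem.List.pyIdx?, pvL0 '?' (by decide), pvL1 '?' (by decide), pvM0 e (hp3' hd)]
          · by_cases he : e = '?'
            · by_cases hc : c = '?' <;> simp [pvFix234, hc, ha, hb, hd, he, pvPad2, PySem.List.pyGet?, PySem.List.pyIdx?, pvL0 '?' (by decide), pvL1 '?' (by decide), pvM1 d (hp4' he)]
            · by_cases hc : c = '?' <;> simp [pvFix234, hc, ha, hb, hd, he, pvPad2, PySem.List.pyGet?, PySem.List.pyIdx?, pvL0 '?' (by decide), pvL1 '?' (by decide)]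
        · by_cases hd : d = '?'
          · by_cases he : e = '?'
            · by_cases hc : c = '?' <;> simp [pvFix234, hc, ha, hb, hd, he, pvPad2, PySem.List.pyGet?, PySem.List.pyIdx?, pvL0 b (hp0' ha), pvM0 '?' (by decide), pvM1 '?' (by decide)]
            · by_cases hc : c = '?' <;> simp [pvFix234, hc, ha, hb, hd, he, pvPad2, PySem.List.pyGet?, PySem.List.pyIdx?, pvL0 b (hp0' ha), pvM0 e (hp3' hd)]
          · by_cases he : e = '?'
            · by_cases hc : c = '?' <;> simp [pvFix234, hc, ha, hb, hd, he, pvPad2, PySem.List.pyGet?, PySem.List.pyIdx?, pvL0 b (hp0' ha), pvM1 d (hp4' he)]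
            · by_cases hc : c = '?' <;> simp [pvFix234, hc, ha, hb, hd, he, pvPad2, PySem.List.pyGet?, PySem.List.pyIdx?, pvL0 b (hp0' ha)]
      · by_cases hb : b = '?'
        · by_cases hd : d = '?'
          · by_cases he : e = '?'
            · by_cases hc : c = '?' <;> simp [pvFix234, hc, ha, hb, hd, he, pvPad2, PySem.List.pyGet?, PySem.List.pyIdx?, pvL1 a (hp1' hb), pvM0 '?' (by decide), pvM1 '?' (by decide)]
            · by_cases hc : c = '?' <;> simp [pvFix234, hc, ha, hb, hd, he, pvPad2, PySem.List.pyGet?, PySem.List.pyIdx?, pvL1 a (hp1' hb), pvM0 e (hp3' hd)]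
          · by_cases he : e = '?'
            · by_cases hc : c = '?' <;> simp [pvFix234, hc, ha, hb, hd, he, pvPad2, PySem.List.pyGet?, PySem.List.pyIdx?, pvL1 a (hp1' hb), pvM1 d (hp4' he)]
            · by_cases hc : c = '?' <;> simp [pvFix234, hc, ha, hb, hd, he, pvPad2, PySem.List.pyGet?, PySem.List.pyIdx?, pvL1 a (hp1' hb)]
        · by_cases hd : d = '?'
          · by_cases he : e = '?'
            · by_cases hc : c = '?' <;> simp [pvFix234, hc, ha, hb, hd, he, pvPad2, PySem.List.pyGet?, PySem.List.pyIdx?, pvM0 '?' (by decide), pvM1 '?' (by decide)]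
            · by_cases hc : c = '?' <;> simp [pvFix234, hc, ha, hb, hd, he, pvPad2, PySem.List.pyGet?, PySem.List.pyIdx?, pvM0 e (hp3' hd)]
          · by_cases he : e = '?'
            · by_cases hc : c = '?' <;> simp [pvFix234, hc, ha, hb, hd, he, pvPad2, PySem.List.pyGet?, PySem.List.pyIdx?, pvM1 d (hp4' he)]
            · by_cases hc : c = '?' <;> simp [pvFix234, hc, ha, hb, hd, he, pvPad2, PySem.List.pyGet?, PySem.List.pyIdx?]

-- ===== VERDICT (by name: the statement is the Claim_ definition above) =====
theorem maximumTime_spec : Claim_equal_maximumTime := by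
  intro time _ hpre
  unfold Spec_maximumTime
  obtain ⟨hne, h1, h5, hp0, hp1, hp3, hp4⟩ := hpre
  have hof : String.ofList time.toList = time := String.ofList_toList
  rw [← hof, a_to_rhs _ (fun x hx hxq => h5 (hxq ▸ hx)), b_to_rhs _ h1 h5 hp0 hp1 hp3 hp4]
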